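-- pv_equiv track=rewrite | github.com/Robstei/chatbotsclient | chatbotsclient/evaluate.py | replace_after_sentence_sign
-- ===== SOURCE A (Python) =====
-- def replace_after_sentence_sign(sentence):
--     for index, char in enumerate(sentence):
--         if char == "." or char == "?" or char == "!":
--             # space counts as char
--             if index + 2 < len(sentence):
--                 sentence = (
--                     sentence[: index + 2]
--                     + sentence[index + 2].upper()
--                     + sentence[index + 3:]
--                 )
--     return sentence
-- ===== SOURCE B (Python) =====
-- def replace_after_sentence_sign(sentence):
--     return "".join(
--         c.upper() if j >= 2 and sentence[j - 2] in ".?!" else c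
--         for j, c in enumerate(sentence)
--     )
-- ===== Notes on version B (the rewrite author's own statement) =====
-- stated objective: simpler
-- what changed: Replaces A's repeated slice-and-rebuild of the string (from each sentence sign, mutate the char two ahead) with a single backward-looking map: each output char is uppercased iff the char two positions behind it in the original string is a sentence sign, joined once.
import Mathlib
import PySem

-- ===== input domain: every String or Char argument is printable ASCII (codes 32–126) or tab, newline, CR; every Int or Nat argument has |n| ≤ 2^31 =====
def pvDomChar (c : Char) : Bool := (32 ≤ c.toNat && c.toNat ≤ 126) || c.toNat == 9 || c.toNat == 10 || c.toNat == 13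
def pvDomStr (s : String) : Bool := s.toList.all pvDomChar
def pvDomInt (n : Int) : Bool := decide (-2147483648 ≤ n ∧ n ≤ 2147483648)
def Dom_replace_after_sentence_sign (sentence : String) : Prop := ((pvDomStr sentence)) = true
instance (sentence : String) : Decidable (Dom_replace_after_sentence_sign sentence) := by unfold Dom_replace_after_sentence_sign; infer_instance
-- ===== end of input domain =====

-- B rebuilds the string in one backward-looking pass (uppercase a char iff the char two
-- positions behind it in the original is a sentence sign) instead of A's forward
-- slice-and-rebuild mutation from each sentence sign; objective: simpler.

-- ===== PORT A =====
-- one iteration of A's for-loop body: p is the (index, char) pair from enumerate(original)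
def pvStepA (cur : List Char) (p : Int × Char) : List Char :=
  if p.2 = '.' ∨ p.2 = '?' ∨ p.2 = '!' then
    if p.1 + 2 < (cur.length : Int) then
      PySem.List.slice cur none (some (p.1 + 2))
        ++ [PySem.Chars.upperChar ((PySem.List.pyGet? cur (p.1 + 2)).getD ' ')]
        ++ PySem.List.slice cur (some (p.1 + 3)) none
    else cur
  else cur

def replace_after_sentence_sign (sentence : String) : String :=
  String.mk ((PySem.List.enumerate sentence.toList 0).foldl pvStepA sentence.toList)

-- ===== PORT B =====
-- the per-character decision of Source B's generator expression
def pvUpAt (orig : List Char) (j : Int) (c : Char) : Char :=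
  if 2 ≤ j ∧ ((PySem.List.pyGet? orig (j - 2)).getD ' ') ∈ ['.', '?', '!'] then
    PySem.Chars.upperChar c
  else c

def replace_after_sentence_sign_alt (sentence : String) : String :=
  String.mk ((PySem.List.enumerate sentence.toList 0).map
    (fun p => pvUpAt sentence.toList p.1 p.2))

-- ===== PRECONDITION & SPEC =====
def Spec_replace_after_sentence_sign (sentence : String) (out : String) : Prop := out = replace_after_sentence_sign_alt sentence
instance (sentence : String) (out : String) : Decidable (Spec_replace_after_sentence_sign sentence out) := by unfold Spec_replace_after_sentence_sign; infer_instance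

-- ===== CLAIM (what is proved, stated in full; the proofs are below) =====
def Claim_equal_replace_after_sentence_sign : Prop := ∀ (sentence : String), Dom_replace_after_sentence_sign sentence → Spec_replace_after_sentence_sign sentence (replace_after_sentence_sign sentence)

-- ===== LEMMAS AND PROOFS =====

-- the fully transformed list (B's result, index-wise)
def pvM (orig : List Char) : List Char :=
  List.mapIdx (fun j c => pvUpAt orig (j : Int) c) orig

-- loop invariant value: after A has processed indices < k, the string is pvM on the
-- first k+2 positions and untouched beyond
def pvRep (orig : List Char) (k : Nat) : List Char :=
  (pvM orig).take (k + 2) ++ orig.drop (k + 2)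

lemma pvM_length (orig : List Char) : (pvM orig).length = orig.length := by
  simp [pvM]

lemma pvM_getElem (orig : List Char) (j : Nat) (h : j < orig.length) :
    (pvM orig)[j]'(by simpa [pvM_length] using h) = pvUpAt orig (j : Int) orig[j] := by
  simp [pvM]

lemma pvRep_length (orig : List Char) (k : Nat) : (pvRep orig k).length = orig.length := by
  simp [pvRep, pvM_length]; omega

lemma pvRep_large (orig : List Char) (k : Nat) (h : orig.length ≤ k + 2) :
    pvRep orig k = pvM orig := by
  unfold pvRep
  rw [List.take_of_length_le (by rw [pvM_length]; omega), List.drop_of_length_le h,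
      List.append_nil]

lemma pvUpAt_small (orig : List Char) (j : Nat) (h : j < 2) (c : Char) :
    pvUpAt orig (j : Int) c = c := by
  unfold pvUpAt
  rw [if_neg]
  rintro ⟨h2, -⟩
  omega

lemma pvRep_getElem_orig (orig : List Char) (k j : Nat) (hj : k + 2 ≤ j)
    (h : j < orig.length) : (pvRep orig k)[j]'(by simpa [pvRep_length] using h) = orig[j] := by
  have hlen : ((pvM orig).take (k + 2)).length = k + 2 := by
    simp [pvM_length]; omega
  simp only [pvRep]
  rw [List.getElem_append_right (by simpa [hlen] using hj)]
  simp only [hlen, List.getElem_drop]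
  congr 1
  omega

lemma pvRep_zero (orig : List Char) : pvRep orig 0 = orig := by
  apply List.ext_getElem
  · simpa using pvRep_length orig 0
  · intro j h1 h2
    by_cases hj : j < 2
    · have hlen : j < ((pvM orig).take 2).length := by
        simp [pvM_length]
        omega
      simp only [pvRep]
      rw [List.getElem_append_left hlen]
      rw [List.getElem_take, pvM_getElem orig j (by omega), pvUpAt_small orig j hj]
    · exact pvRep_getElem_orig orig 0 j (by omega) h2

-- one loop iteration preserves the invariant
lemma pvStepA_rep (orig : List Char) (k : Nat) (hk : k < orig.length) :
    pvStepA (pvRep orig k) ((k : Int), orig[k]) = pvRep orig (k + 1) := by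
  by_cases hs : orig[k] = '.' ∨ orig[k] = '?' ∨ orig[k] = '!'
  · by_cases hb : k + 2 < orig.length
    · -- real update at position k+2
      have hcast : ((k : Int) + 2) = ((k + 2 : Nat) : Int) := by push_cast; ring
      have hcast3 : ((k : Int) + 3) = ((k + 3 : Nat) : Int) := by push_cast; ring
      have hrepl := pvRep_length orig k
      have hget : (PySem.List.pyGet? (pvRep orig k) ((k : Int) + 2)).getD ' ' = orig[k + 2] := by
        rw [hcast, PySem.List.pyGet?_natCast,
            List.getElem?_eq_getElem (by omega : k + 2 < (pvRep orig k).length)]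
        simp [pvRep_getElem_orig orig k (k + 2) (le_refl _) hb]
      unfold pvStepA
      rw [if_pos hs, if_pos (by simp; omega), hget, hcast, hcast3,
          PySem.List.slice_to_natCast, PySem.List.slice_from_natCast]
      -- take (k+2) of pvRep k is take (k+2) of pvM; drop (k+3) is orig.drop (k+3)
      have hMlen : k + 2 ≤ (pvM orig).length := by rw [pvM_length]; omega
      have h1 : ((pvM orig).take (k + 2)).length = k + 2 := by
        simp [pvM_length]; omega
      have htake : (pvRep orig k).take (k + 2) = (pvM orig).take (k + 2) := by
        unfold pvRep
        rw [List.take_append_of_le_length (by omega), List.take_take]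
        congr 1
        omega
      have hdrop : (pvRep orig k).drop (k + 3) = orig.drop (k + 3) := by
        apply List.ext_getElem
        · simp [pvRep_length]
        · intro i hi1 hi2
          have hi : i < orig.length - (k + 3) := by simpa using hi2
          rw [List.getElem_drop, List.getElem_drop]
          exact pvRep_getElem_orig orig k (k + 3 + i) (by omega) (by omega)
      have hup : PySem.Chars.upperChar orig[k + 2] = pvUpAt orig ((k + 2 : Nat) : Int) orig[k + 2] := by
        unfold pvUpAt
        rw [if_pos]
        constructor
        · omega
        · have : ((k + 2 : Nat) : Int) - 2 = ((k : Nat) : Int) := by push_cast; ring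
          rw [this, PySem.List.pyGet?_natCast, List.getElem?_eq_getElem hk]
          simpa using hs
      rw [htake, hdrop, hup]
      have hM : (pvM orig).take (k + 1 + 2) = (pvM orig).take (k + 2) ++ [pvUpAt orig ((k + 2 : Nat) : Int) orig[k + 2]] := by
        rw [show k + 1 + 2 = (k + 2) + 1 from by omega, List.take_add_one,
            List.getElem?_eq_getElem (by rw [pvM_length]; omega)]
        simp [pvM_getElem orig (k + 2) hb]
      unfold pvRep
      rw [hM, show k + 1 + 2 = k + 3 from by omega, List.append_assoc]
    · -- guard fails: no change, and the representation is already saturated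
      unfold pvStepA
      rw [if_pos hs, if_neg (by rw [pvRep_length]; simp; omega)]
      rw [pvRep_large orig k (by omega), pvRep_large orig (k + 1) (by omega)]
  · -- not a sentence sign: no change, and pvUpAt is the identity at k+2
    unfold pvStepA
    rw [if_neg hs]
    by_cases hb : k + 2 < orig.length
    · apply List.ext_getElem
      · rw [pvRep_length, pvRep_length]
      · intro j h1 h2
        rcases lt_or_ge j (k + 2) with hj | hj
        · have hl : j < ((pvM orig).take (k + 2)).length := by
            simp [pvM_length]; omega
          have hl' : j < ((pvM orig).take (k + 1 + 2)).length := by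
            simp [pvM_length]; omega
          simp only [pvRep]
          rw [List.getElem_append_left hl, List.getElem_append_left hl',
              List.getElem_take, List.getElem_take]
        · have horig : j < orig.length := by
            have := pvRep_length orig k
            omega
          rcases eq_or_lt_of_le hj with hj2 | hj2
          · -- j = k+2 : pvUpAt is identity there since orig[k] is not a sign
            have hjk : j = k + 2 := hj2.symm
            subst hjk
            rw [pvRep_getElem_orig orig k (k + 2) (le_refl _) horig]
            have hl' : k + 2 < ((pvM orig).take (k + 1 + 2)).length := by
              simp [pvM_length]; omega
            simp only [pvRep]
            rw [List.getElem_append_left hl', List.getElem_take,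
                pvM_getElem orig (k + 2) horig]
            unfold pvUpAt
            rw [if_neg]
            rintro ⟨-, hmem⟩
            have : ((k + 2 : Nat) : Int) - 2 = ((k : Nat) : Int) := by push_cast; ring
            rw [this, PySem.List.pyGet?_natCast, List.getElem?_eq_getElem hk] at hmem
            simp at hmem
            exact hs (by tauto)
          · rw [pvRep_getElem_orig orig k j hj horig,
                pvRep_getElem_orig orig (k + 1) j (by omega) horig]
    · rw [pvRep_large orig k (by omega), pvRep_large orig (k + 1) (by omega)]

-- the whole loop: folding over the enumerated suffix from index k finishes the map
lemma pvLoopA (orig : List Char) : ∀ (rest : List Char) (k : Nat), rest = orig.drop k →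
    (PySem.List.enumerate rest (k : Int)).foldl pvStepA (pvRep orig k) = pvM orig := by
  intro rest
  induction rest with
  | nil =>
    intro k hk
    have : orig.length ≤ k := by
      by_contra h
      have := congrArg List.length hk
      simp at this
      omega
    simp [PySem.List.enumerate, pvRep_large orig k (by omega)]
  | cons c rest' ih =>
    intro k hk
    have hklen : k < orig.length := by
      by_contra h
      rw [List.drop_of_length_le (by omega)] at hk
      simp at hk
    have hc : orig[k] = c := by
      have h0 := congrArg (fun l => l[0]?) hk
      simp [List.getElem?_drop, List.getElem?_eq_getElem hklen] at h0
      exact h0.symm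
    have hrest : rest' = orig.drop (k + 1) := by
      have ht := congrArg List.tail hk
      simpa [List.tail_drop] using ht
    rw [PySem.List.enumerate_cons, List.foldl_cons, ← hc, pvStepA_rep orig k hklen]
    have : (k : Int) + 1 = ((k + 1 : Nat) : Int) := by push_cast; ring
    rw [this]
    exact ih (k + 1) hrest

-- B's map over enumerate equals pvM
lemma pvAlt_eq_M (orig : List Char) :
    (PySem.List.enumerate orig 0).map (fun p => pvUpAt orig p.1 p.2) = pvM orig := by
  apply List.ext_getElem
  · simp [PySem.List.length_enumerate, pvM_length]
  · intro j h1 h2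
    rw [List.getElem_map, PySem.List.getElem_enumerate, pvM_getElem orig j
      (by simpa [PySem.List.length_enumerate] using (by simpa using h1))]
    simp

-- ===== VERDICT (by name: the statement is the Claim_ definition above) =====
theorem replace_after_sentence_sign_spec : Claim_equal_replace_after_sentence_sign := by
  intro sentence _
  unfold Spec_replace_after_sentence_sign replace_after_sentence_sign replace_after_sentence_sign_alt
  rw [pvAlt_eq_M]
  have h0 := pvLoopA sentence.toList sentence.toList 0 (by simp)
  rw [pvRep_zero] at h0
  exact congrArg String.mk h0
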